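-- pv_equiv track=rewrite | github.com/phausser/tiny-basic | tinybasic/interpreter.py | _ensure_line_numbers
-- ===== SOURCE A (Python) =====
-- def _ensure_line_numbers(source: str) -> str:
--     raw_lines = source.splitlines()
--     if not raw_lines:
--         return ""
--
--     def has_number_prefix(text: str) -> bool:
--         stripped = text.lstrip()
--         if not stripped:
--             return False
--         parts = stripped.split(maxsplit=1)
--         return parts[0].isdigit()
--
--     numbered_flags = [
--         has_number_prefix(ln) for ln in raw_lines if ln.strip()
--     ]
--     if numbered_flags and any(numbered_flags) and not all(numbered_flags):
--         raise ValueError("Mixed numbered and unnumbered lines are not allowed")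
--
--     if all((not ln.strip()) or has_number_prefix(ln) for ln in raw_lines):
--         return source if source.endswith("\n") else f"{source}\n"
--
--     numbered: list[str] = []
--     line_no = 10
--     for ln in raw_lines:
--         if not ln.strip():
--             continue
--         numbered.append(f"{line_no} {ln}")
--         line_no += 10
--     return "\n".join(numbered) + "\n"
-- ===== SOURCE B (Python) =====
-- def _ensure_line_numbers(source: str) -> str:
--     if not source:
--         return ""
--
--     def numbered(line: str) -> bool:
--         return line.lstrip().split(maxsplit=1)[0].isdigit()
--
--     it = iter(source.splitlines())
--     for first in it:
--         if first.strip():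
--             break
--     else:  # only blank lines (or none): nothing to number
--         return source if source.endswith("\n") else source + "\n"
--
--     if numbered(first):
--         # numbered mode: every later non-blank line must be numbered too
--         for ln in it:
--             if ln.strip() and not numbered(ln):
--                 raise ValueError("Mixed numbered and unnumbered lines are not allowed")
--         return source if source.endswith("\n") else source + "\n"
--
--     # unnumbered mode: renumber by tens, refusing any numbered line
--     out = [f"10 {first}"]
--     for ln in it:
--         if not ln.strip():
--             continue
--         if numbered(ln):
--             raise ValueError("Mixed numbered and unnumbered lines are not allowed")
--         out.append(f"{10 * (len(out) + 1)} {ln}")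
--     return "\n".join(out) + "\n"
-- ===== Notes on version B (the rewrite author's own statement) =====
-- stated objective: alternative
-- what changed: B decides the numbering mode from the FIRST non-blank line and then performs one mode-directed streaming pass (verify-only in numbered mode, renumber-as-you-go with an early raise in unnumbered mode), replacing A's global classification via a flag list, any/all, a second all() generator pass and a separate counter loop.
import Mathlib
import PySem

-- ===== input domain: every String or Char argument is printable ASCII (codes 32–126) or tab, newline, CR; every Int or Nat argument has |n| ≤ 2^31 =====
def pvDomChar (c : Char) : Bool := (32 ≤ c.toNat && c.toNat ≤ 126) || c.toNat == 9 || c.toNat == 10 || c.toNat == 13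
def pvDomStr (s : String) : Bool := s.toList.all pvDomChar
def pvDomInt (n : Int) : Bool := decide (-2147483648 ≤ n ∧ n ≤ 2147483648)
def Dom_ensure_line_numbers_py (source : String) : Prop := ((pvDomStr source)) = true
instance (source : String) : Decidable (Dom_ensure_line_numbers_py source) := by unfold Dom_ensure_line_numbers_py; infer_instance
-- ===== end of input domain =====

-- B decides the mode (numbered / unnumbered) from the FIRST non-blank line and then makes one
-- mode-directed streaming pass over the remaining lines, instead of A's flag list + any/all +
-- second all() pass + counter loop; objective: alternative (same O(n) cost, different control).

-- ===== PORT A =====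
-- helper has_number_prefix of A
def pvHasNumberPrefix (text : List Char) : Bool :=
  let stripped := PySem.Chars.lstrip text
  if stripped.isEmpty then false
  else PySem.Chars.strIsdigit ((PySem.Chars.split₀Max stripped 1).getD 0 [])
  -- parts[0]: 'stripped' is non-empty here, so split₀Max is non-empty and getD 0 is exact

def ensure_line_numbers_py (source : String) : String :=
  let raw_lines := PySem.Chars.splitlines source.toList
  if raw_lines = [] then ""
  else
    let numbered_flags := (raw_lines.filter (fun ln => !(PySem.Chars.strip ln).isEmpty)).map pvHasNumberPrefix
    if !numbered_flags.isEmpty && numbered_flags.any id && !numbered_flags.all id then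
      ""  -- Python: raise ValueError("Mixed numbered and unnumbered lines…"); excluded by Pre_
    else if raw_lines.all (fun ln => (PySem.Chars.strip ln).isEmpty || pvHasNumberPrefix ln) then
      if PySem.Chars.endswith source.toList ['\n'] then source
      else String.ofList (source.toList ++ ['\n'])
    else
      let st := raw_lines.foldl
        (fun (acc : List (List Char) × Int) ln =>
          if (PySem.Chars.strip ln).isEmpty then acc
          else (acc.1 ++ [PySem.Int.toChars acc.2 ++ ' ' :: ln], acc.2 + 10)) ([], 10)
      String.ofList (PySem.Chars.join ['\n'] st.1 ++ ['\n'])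

-- ===== PORT B =====
-- helper numbered of B: ln.lstrip().split(maxsplit=1)[0].isdigit() (only reached on non-blank ln)
def pvIsNumbered (ln : List Char) : Bool :=
  PySem.Chars.strIsdigit ((PySem.Chars.split₀Max (PySem.Chars.lstrip ln) 1).getD 0 [])

-- B's 'for first in it: if first.strip(): break / else:' — first non-blank line and the rest
def pvFindFirst : List (List Char) → Option (List Char × List (List Char))
  | [] => none
  | ln :: rest => if (PySem.Chars.strip ln).isEmpty then pvFindFirst rest else some (ln, rest)

def ensure_line_numbers_py_alt (source : String) : String :=
  if source = "" then ""
  else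
    match pvFindFirst (PySem.Chars.splitlines source.toList) with
    | none =>
      if PySem.Chars.endswith source.toList ['\n'] then source
      else String.ofList (source.toList ++ ['\n'])
    | some (first, it) =>
      if pvIsNumbered first then
        -- 'for ln in it: if ln.strip() and not numbered(ln): raise' as an all-check
        if it.all (fun ln => (PySem.Chars.strip ln).isEmpty || pvIsNumbered ln) then
          if PySem.Chars.endswith source.toList ['\n'] then source
          else String.ofList (source.toList ++ ['\n'])
        else ""  -- Python: raise ValueError("Mixed numbered and unnumbered lines…"); excluded by Pre_
      else
        -- renumbering loop; a raise mid-loop propagates as 'none'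
        match it.foldl
            (fun (acc : Option (List (List Char))) ln =>
              match acc with
              | none => none
              | some out =>
                if (PySem.Chars.strip ln).isEmpty then some out
                else if pvIsNumbered ln then none
                else some (out ++ [PySem.Int.toChars (10 * ((out.length : Int) + 1)) ++ ' ' :: ln]))
            (some [['1', '0'] ++ ' ' :: first]) with
        | none => ""  -- Python: raise ValueError("Mixed numbered and unnumbered lines…"); excluded by Pre_
        | some out => String.ofList (PySem.Chars.join ['\n'] out ++ ['\n'])

-- ===== PRECONDITION & SPEC =====
-- Pre_ excludes exactly the sources mixing numbered and unnumbered non-blank lines, on which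
-- A (and B alike) raise ValueError.
def Pre_ensure_line_numbers_py (source : String) : Prop :=
  let flags := ((PySem.Chars.splitlines source.toList).filter
      (fun ln => !(PySem.Chars.strip ln).isEmpty)).map pvHasNumberPrefix
  flags.all id = true ∨ flags.all (fun b => !b) = true
instance (source : String) : Decidable (Pre_ensure_line_numbers_py source) := by
  unfold Pre_ensure_line_numbers_py; infer_instance

def pvWitness_ensure_line_numbers_py : String := "PRINT 1\nGOTO 10"

def Spec_ensure_line_numbers_py (source : String) (out : String) : Prop := out = ensure_line_numbers_py_alt source
instance (source : String) (out : String) : Decidable (Spec_ensure_line_numbers_py source out) := by unfold Spec_ensure_line_numbers_py; infer_instance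

-- ===== CLAIM (what is proved, stated in full; the proofs are below) =====
def Claim_equal_ensure_line_numbers_py : Prop := ∀ (source : String), Dom_ensure_line_numbers_py source → Pre_ensure_line_numbers_py source → Spec_ensure_line_numbers_py source (ensure_line_numbers_py source)

-- ===== LEMMAS AND PROOFS =====

-- B's helper agrees with A's on every line (on an all-whitespace line A's extra guard returns
-- false, which is what B's expression computes there anyway).
lemma pvIsNumbered_eq (ln : List Char) : pvIsNumbered ln = pvHasNumberPrefix ln := by
  unfold pvIsNumbered pvHasNumberPrefix
  by_cases h : (PySem.Chars.lstrip ln).isEmpty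
  · rw [List.isEmpty_iff] at h
    rw [h]
    decide
  · simp [h]

-- splitlines of a non-empty char list is non-empty
lemma splitlines_go_eq_nil (isB : Char → Bool) :
    ∀ (n : Nat) (s cur : List Char) (acc : List (List Char)), s.length ≤ n →
      PySem.Chars.splitlines.go isB s cur acc = [] → s = [] ∧ cur = [] ∧ acc = [] := by
  intro n
  induction n with
  | zero =>
    intro s cur acc hlen h
    have hs : s = [] := List.eq_nil_of_length_eq_zero (Nat.le_zero.mp hlen)
    subst hs
    rw [PySem.Chars.splitlines.go] at h
    split_ifs at h with hc
    · exact ⟨rfl, List.isEmpty_iff.mp hc, by simpa using h⟩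
    · simp at h
  | succ n ih =>
    intro s cur acc hlen h
    rw [PySem.Chars.splitlines.go.eq_def] at h
    split at h
    · split_ifs at h with hc
      · exact ⟨rfl, List.isEmpty_iff.mp hc, by simpa using h⟩
      · simp at h
    · rename_i rest
      obtain ⟨-, -, hacc⟩ := ih rest [] _ (by simp at hlen; omega) h
      simp at hacc
    · rename_i c rest _
      split_ifs at h with hb
      · obtain ⟨-, -, hacc⟩ := ih rest [] _ (by simp at hlen; omega) h
        simp at hacc
      · obtain ⟨-, hcur, -⟩ := ih rest (c :: cur) _ (by simp at hlen; omega) h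
        simp at hcur

lemma splitlines_ne_nil {cs : List Char} (h : cs ≠ []) : PySem.Chars.splitlines cs ≠ [] := by
  unfold PySem.Chars.splitlines
  intro hgo
  exact h (splitlines_go_eq_nil _ cs.length cs [] [] le_rfl hgo).1

-- proof-side names for the ports' loop bodies and the non-blank test
def pvNB (ln : List Char) : Bool := !(PySem.Chars.strip ln).isEmpty
def pvStepA : List (List Char) × Int → List Char → List (List Char) × Int :=
  fun acc ln =>
    if (PySem.Chars.strip ln).isEmpty then acc
    else (acc.1 ++ [PySem.Int.toChars acc.2 ++ ' ' :: ln], acc.2 + 10)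
def pvStepB : Option (List (List Char)) → List Char → Option (List (List Char)) :=
  fun acc ln =>
    match acc with
    | none => none
    | some out =>
      if (PySem.Chars.strip ln).isEmpty then some out
      else if pvIsNumbered ln then none
      else some (out ++ [PySem.Int.toChars (10 * ((out.length : Int) + 1)) ++ ' ' :: ln])

-- proof-side renumbering function naming A's numbering loop
def pvRenum (n : Int) : List (List Char) → List (List Char)
  | [] => []
  | x :: xs => (PySem.Int.toChars n ++ ' ' :: x) :: pvRenum (n + 10) xs

-- characterisation of A's numbering loop
lemma foldA (l : List (List Char)) (acc : List (List Char)) (n : Int) :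
    (l.foldl pvStepA (acc, n)).1 = acc ++ pvRenum n (l.filter pvNB) := by
  induction l generalizing acc n with
  | nil => simp [pvRenum]
  | cons x t ih =>
    rw [List.foldl_cons]
    by_cases hx : (PySem.Chars.strip x).isEmpty
    · have h1 : pvStepA (acc, n) x = (acc, n) := by simp [pvStepA, hx]
      rw [h1, ih, List.filter_cons_of_neg (by simp [pvNB, hx])]
    · have h1 : pvStepA (acc, n) x = (acc ++ [PySem.Int.toChars n ++ ' ' :: x], n + 10) := by
        simp [pvStepA, hx]
      rw [h1, ih, List.filter_cons_of_pos (by simp [pvNB, hx])]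
      simp [pvRenum, List.append_assoc]

-- characterisation of B's numbering loop, when no non-blank line of l is numbered
lemma foldB (l : List (List Char)) (out : List (List Char))
    (h : ∀ x ∈ l, pvNB x = true → pvIsNumbered x = false) :
    l.foldl pvStepB (some out) = some (out ++ pvRenum (10 * ((out.length : Int) + 1)) (l.filter pvNB)) := by
  induction l generalizing out with
  | nil => simp [pvRenum]
  | cons x t ih =>
    rw [List.foldl_cons]
    by_cases hx : (PySem.Chars.strip x).isEmpty
    · have h1 : pvStepB (some out) x = some out := by simp [pvStepB, hx]
      rw [h1, ih _ (fun y hy => h y (List.mem_cons_of_mem x hy)),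
        List.filter_cons_of_neg (by simp [pvNB, hx])]
    · have hnum : pvIsNumbered x = false := h x List.mem_cons_self (by simp [pvNB, hx])
      have h1 : pvStepB (some out) x
          = some (out ++ [PySem.Int.toChars (10 * ((out.length : Int) + 1)) ++ ' ' :: x]) := by
        simp [pvStepB, hx, hnum]
      rw [h1, ih _ (fun y hy => h y (List.mem_cons_of_mem x hy)),
        List.filter_cons_of_pos (by simp [pvNB, hx])]
      have hlen : (10 : Int) * (((out ++ [PySem.Int.toChars (10 * ((out.length : Int) + 1)) ++ ' ' :: x]).length : Int) + 1)
          = 10 * ((out.length : Int) + 1) + 10 := by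
        simp only [List.length_append, List.length_cons, List.length_nil]
        push_cast
        ring
      rw [hlen]
      simp [pvRenum, List.append_assoc]

-- pvFindFirst finds the first non-blank line
lemma findFirst_none (l : List (List Char)) (h : pvFindFirst l = none) :
    ∀ x ∈ l, pvNB x = false := by
  induction l with
  | nil => simp
  | cons x t ih =>
    rw [pvFindFirst] at h
    by_cases hx : (PySem.Chars.strip x).isEmpty
    · rw [if_pos hx] at h
      intro y hy
      rcases List.mem_cons.mp hy with rfl | hy
      · simp [pvNB, hx]
      · exact ih h y hy
    · rw [if_neg hx] at h
      exact absurd h (by simp)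

lemma findFirst_some (l : List (List Char)) (f : List Char) (r : List (List Char))
    (h : pvFindFirst l = some (f, r)) :
    pvNB f = true ∧ l.filter pvNB = f :: r.filter pvNB := by
  induction l with
  | nil => simp [pvFindFirst] at h
  | cons x t ih =>
    rw [pvFindFirst] at h
    by_cases hx : (PySem.Chars.strip x).isEmpty
    · rw [if_pos hx] at h
      obtain ⟨h1, h2⟩ := ih h
      exact ⟨h1, by rw [List.filter_cons_of_neg (by simp [pvNB, hx]), h2]⟩
    · rw [if_neg hx] at h
      injection h with h'
      injection h' with hf hr
      subst hf; subst hr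
      exact ⟨by simp [pvNB, hx], by rw [List.filter_cons_of_pos (by simp [pvNB, hx])]⟩

lemma toList_ne_nil {s : String} (h : s ≠ "") : s.toList ≠ [] := by
  intro hl
  exact h (String.toList_eq_nil_iff.mp hl)

-- ===== VERDICT (by name: the statement is the Claim_ definition above) =====
theorem ensure_line_numbers_py_spec : Claim_equal_ensure_line_numbers_py := by
  intro source hdom hpre
  unfold Spec_ensure_line_numbers_py
  by_cases hs : source = ""
  · subst hs; decide
  · have hraw : PySem.Chars.splitlines source.toList ≠ [] := splitlines_ne_nil (toList_ne_nil hs)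
    unfold Pre_ensure_line_numbers_py at hpre
    simp only [ensure_line_numbers_py, ensure_line_numbers_py_alt]
    rw [show (fun (acc : List (List Char) × Int) ln =>
        if (PySem.Chars.strip ln).isEmpty then acc
        else (acc.1 ++ [PySem.Int.toChars acc.2 ++ ' ' :: ln], acc.2 + 10)) = pvStepA from rfl,
      show (fun (acc : Option (List (List Char))) ln =>
        match acc with
        | none => none
        | some out =>
          if (PySem.Chars.strip ln).isEmpty then some out
          else if pvIsNumbered ln then none
          else some (out ++ [PySem.Int.toChars (10 * ((out.length : Int) + 1)) ++ ' ' :: ln])) = pvStepB from rfl,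
      show (fun ln => !(PySem.Chars.strip ln).isEmpty) = pvNB from rfl]
    rw [show (fun ln => !(PySem.Chars.strip ln).isEmpty) = pvNB from rfl] at hpre
    rw [if_neg hraw, if_neg hs]
    set raw := PySem.Chars.splitlines source.toList with hrawdef
    rcases hff : pvFindFirst raw with _ | ⟨f, it⟩
    ·
      -- only blank lines: both return the source with a trailing newline
      have hblank := findFirst_none raw hff
      have hnbnil : raw.filter pvNB = [] := by
        rw [List.filter_eq_nil_iff]
        intro x hx
        simp [hblank x hx]
      have hA : raw.all (fun ln => (PySem.Chars.strip ln).isEmpty || pvHasNumberPrefix ln) = true := by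
        rw [List.all_eq_true]
        intro ln hln
        have h1 := hblank ln hln
        have hb : (PySem.Chars.strip ln).isEmpty = true := by simpa [pvNB] using h1
        simp [hb]
      rw [hnbnil]
      simp [hA]
    · dsimp only
      obtain ⟨hfnb, hsplit⟩ := findFirst_some raw f it hff
      have hfmem : f ∈ raw.filter pvNB := by rw [hsplit]; exact List.mem_cons_self
      by_cases hN : pvIsNumbered f = true
      · -- numbered mode: all flags are true, both pass the source through
        have hfflag : pvHasNumberPrefix f = true := by rw [← pvIsNumbered_eq, hN]
        have hall : ((raw.filter pvNB).map pvHasNumberPrefix).all id = true := by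
          rcases hpre with h1 | h2
          · exact h1
          · have := List.all_eq_true.mp h2 (pvHasNumberPrefix f) (List.mem_map_of_mem hfmem)
            simp [hfflag] at this
        have hallmem : ∀ x ∈ raw.filter pvNB, pvHasNumberPrefix x = true := by
          intro x hx
          have := List.all_eq_true.mp hall (pvHasNumberPrefix x) (List.mem_map_of_mem hx)
          simpa using this
        have hBall : it.all (fun ln => (PySem.Chars.strip ln).isEmpty || pvIsNumbered ln) = true := by
          rw [List.all_eq_true]
          intro ln hln
          by_cases hb : (PySem.Chars.strip ln).isEmpty
          · simp [hb]
          · have hmem : ln ∈ raw.filter pvNB := by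
              rw [hsplit]
              exact List.mem_cons_of_mem f (List.mem_filter.mpr ⟨hln, by simp [pvNB, hb]⟩)
            simp [pvIsNumbered_eq, hallmem ln hmem]
        have hA : raw.all (fun ln => (PySem.Chars.strip ln).isEmpty || pvHasNumberPrefix ln) = true := by
          rw [List.all_eq_true]
          intro ln hln
          by_cases hb : (PySem.Chars.strip ln).isEmpty
          · simp [hb]
          · have hmem : ln ∈ raw.filter pvNB := List.mem_filter.mpr ⟨hln, by simp [pvNB, hb]⟩
            simp [hallmem ln hmem]
        have hguard : ¬ ((!(((raw.filter pvNB).map pvHasNumberPrefix).isEmpty) &&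
            (((raw.filter pvNB).map pvHasNumberPrefix).any id) &&
            !(((raw.filter pvNB).map pvHasNumberPrefix).all id)) = true) := by
          simp [hall]
        rw [if_neg hguard, if_pos hA, if_pos hN, if_pos hBall]
      · -- unnumbered mode: all flags are false, both renumber by tens
        have hN' : pvIsNumbered f = false := by simpa using hN
        have hfflag : pvHasNumberPrefix f = false := by rw [← pvIsNumbered_eq, hN']
        have hnoneall : (((raw.filter pvNB).map pvHasNumberPrefix).all (fun b => !b)) = true := by
          rcases hpre with h1 | h2
          · have := List.all_eq_true.mp h1 (pvHasNumberPrefix f) (List.mem_map_of_mem hfmem)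
            simp [hfflag] at this
          · exact h2
        have hnone : ∀ x ∈ raw.filter pvNB, pvHasNumberPrefix x = false := by
          intro x hx
          have := List.all_eq_true.mp hnoneall (pvHasNumberPrefix x) (List.mem_map_of_mem hx)
          simpa using this
        have hany : (((raw.filter pvNB).map pvHasNumberPrefix).any id) = false := by
          simp only [List.any_eq_false]
          intro b hb
          rcases List.mem_map.mp hb with ⟨x, hx, rfl⟩
          simp [hnone x hx]
        have hguard : ¬ ((!(((raw.filter pvNB).map pvHasNumberPrefix).isEmpty) &&
            (((raw.filter pvNB).map pvHasNumberPrefix).any id) &&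
            !(((raw.filter pvNB).map pvHasNumberPrefix).all id)) = true) := by
          simp [hany]
        have hfraw : f ∈ raw := (List.mem_filter.mp hfmem).1
        have hAfalse : ¬ (raw.all (fun ln => (PySem.Chars.strip ln).isEmpty || pvHasNumberPrefix ln) = true) := by
          intro hA
          have h1 := List.all_eq_true.mp hA f hfraw
          have hb : (PySem.Chars.strip f).isEmpty = false := by simpa [pvNB] using hfnb
          simp [hb, hfflag] at h1
        have hitnone : ∀ x ∈ it, pvNB x = true → pvIsNumbered x = false := by
          intro x hx hxnb
          have hmem : x ∈ raw.filter pvNB := by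
            rw [hsplit]
            exact List.mem_cons_of_mem f (List.mem_filter.mpr ⟨hx, hxnb⟩)
          rw [pvIsNumbered_eq]
          exact hnone x hmem
        rw [if_neg hguard, if_neg hAfalse, if_neg hN,
          foldB it _ hitnone, foldA raw [] 10, hsplit]
        have h10 : (['1', '0'] ++ ' ' :: f) = PySem.Int.toChars 10 ++ ' ' :: f := by
          have : PySem.Int.toChars 10 = ['1', '0'] := by decide
          rw [this]
        rw [h10]
        have h20 : (10 : Int) * (((([PySem.Int.toChars 10 ++ ' ' :: f] : List (List Char)).length : Int)) + 1) = 20 := by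
          norm_num
        rw [h20]
        simp [pvRenum]
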